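-- pv_equiv track=rewrite | github.com/yunnina01/Baekjoon | 백준/Gold/1963. 소수 경로/소수 경로.py | BFS
-- ===== SOURCE A (Python) =====
-- from collections import deque
--
-- prime = [1] * 10000
--
-- def BFS(s, e):
--     dq = deque()
--     dq.append([s, 0])
--     visit = [0] * 10000
--     visit[s] = 1
--     while dq:
--         cur, cnt = dq.popleft()
--         strcur = str(cur)
--         if cur == e:
--             return cnt
--         for i in range(4):
--             for j in range(10):
--                 temp = int(strcur[: i] + str(j) + strcur[i + 1 :])
--                 if not visit[temp] and prime[temp] and temp >= 1000:
--                     visit[temp] = 1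
--                     dq.append([temp, cnt + 1])
-- ===== SOURCE B (Python) =====
-- prime = [1] * 10000
--
-- def BFS(s, e):
--     visit = [0] * 10000
--     visit[s] = 1
--
--     def neighbors(cur):
--         strcur = str(cur)
--         return [int(strcur[:i] + str(j) + strcur[i + 1:])
--                 for i in range(4) for j in range(10)]
--
--     def level(frontier, depth):
--         if not frontier:
--             return None
--         if e in frontier:
--             return depth
--         nxt = []
--         for cur in frontier:
--             for temp in neighbors(cur):
--                 if temp >= 1000 and prime[temp] and not visit[temp]:
--                     visit[temp] = 1
--                     nxt.append(temp)
--         return level(nxt, depth + 1)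
--
--     return level([s], 0)
-- ===== Notes on version B (the rewrite author's own statement) =====
-- stated objective: alternative
-- what changed: B replaces A's deque of [node,cnt] pairs by a recursive level-synchronous BFS: it recurses on whole frontier lists with a depth counter, answers by an 'e in frontier' membership test per level instead of a per-pop comparison, and builds each next level by expanding and filtering the current one; neighbor generation is factored into a helper and no queue or pair bookkeeping exists.
import Mathlib
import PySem

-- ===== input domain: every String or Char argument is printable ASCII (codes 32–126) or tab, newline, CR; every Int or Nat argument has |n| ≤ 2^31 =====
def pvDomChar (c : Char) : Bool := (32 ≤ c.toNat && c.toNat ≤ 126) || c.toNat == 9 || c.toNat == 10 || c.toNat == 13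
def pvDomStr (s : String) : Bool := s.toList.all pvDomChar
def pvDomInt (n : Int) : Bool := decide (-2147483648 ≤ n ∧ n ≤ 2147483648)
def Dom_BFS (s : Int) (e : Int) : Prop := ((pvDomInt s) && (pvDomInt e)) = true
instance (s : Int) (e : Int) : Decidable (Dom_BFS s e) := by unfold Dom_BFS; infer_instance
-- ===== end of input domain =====

-- B replaces A's deque of [node,cnt] pairs by a recursive level-synchronous BFS
-- (frontier list + depth counter, membership test per level); objective: alternative
-- decomposition, same cost.
-- Python lists of fixed length 10000 are ported as Array Int (Python-exact index rules via
-- PySem.List.pyIdx?, the normalisation PySem's own pyGet?/pySet? use: same wrap-around for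
-- negative indices, none = IndexError).  Both loops carry a fuel parameter solely as a
-- totality guard (the loops always terminate; 20002 exceeds any possible iteration count,
-- since every BFS iteration beyond the first 2 needs a fresh cell of the 10000-cell visit
-- array, so the 0-fuel branch is unreachable from BFS/BFS_alt).

-- Array counterparts of PySem.List.pyGet? / pySet? / pySetD (exact: same pyIdx? index
-- normalisation, none exactly where Python raises IndexError)
def pvAGet? (xs : Array Int) (i : Int) : Option Int :=
  (PySem.List.pyIdx? xs.size i).bind fun k => xs[k]?

def pvASet? (xs : Array Int) (i : Int) (v : Int) : Option (Array Int) :=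
  (PySem.List.pyIdx? xs.size i).map fun k => xs.setIfInBounds k v

def pvASetD (xs : Array Int) (i : Int) (v : Int) : Array Int := (pvASet? xs i v).getD xs

-- ===== PORT A =====

-- prime = [1] * 10000  (module constant, shared by both Pythons)
def pvPrime : Array Int := Array.replicate 10000 1

-- temp = int(strcur[:i] + str(j) + strcur[i+1:])  (the same line occurs in both Pythons)
def pvReplace (strcur : List Char) (i j : Int) : Int :=
  match PySem.Int.ofChars? (PySem.List.slice strcur none (some i) ++ PySem.Int.toChars j
      ++ PySem.List.slice strcur (some (i + 1)) none) with
  | some t => t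
  | none => 0   -- unreachable: the assembled characters always form an int literal

-- one inner-loop body of A:  if not visit[temp] and prime[temp] and temp >= 1000: ...
def pvStepA (cnt : Int) (st : Array Int × List (Int × Int)) (temp : Int) :
    Array Int × List (Int × Int) :=
  match pvAGet? st.1 temp with
  | none => st          -- Python raises IndexError here (outside Pre_)
  | some vt =>
    if vt = 0 then
      match pvAGet? pvPrime temp with
      | none => st
      | some pt =>
        if pt ≠ 0 ∧ 1000 ≤ temp then
          (pvASetD st.1 temp 1, st.2 ++ [(temp, cnt + 1)])
        else st
    else st

-- the while-loop of A (fuel = totality guard only; BFS supplies more than enough)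
def pvLoopA (e : Int) : Nat → Array Int → List (Int × Int) → Option Int
  | 0, _, _ => none
  | _ + 1, _, [] => none
  | fuel + 1, visit, (cur, cnt) :: rest =>
    if cur = e then some cnt
    else
      let st := (PySem.List.pyRange 0 4 1).foldl
        (fun st i => (PySem.List.pyRange 0 10 1).foldl
          (fun st j => pvStepA cnt st (pvReplace (PySem.Int.toChars cur) i j)) st)
        (visit, rest)
      pvLoopA e fuel st.1 st.2

def BFS (s : Int) (e : Int) : Option Int :=
  match pvASet? (Array.replicate 10000 (0 : Int)) s 1 with
  | some visit => pvLoopA e 20002 visit [(s, 0)]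
  | none => none    -- Python raises IndexError on visit[s] = 1 (outside Pre_)

-- ===== PORT B =====

-- neighbors(cur): the 40 candidate numbers, in comprehension order
def pvNbrs (cur : Int) : List Int :=
  (PySem.List.pyRange 0 4 1).flatMap fun i =>
    (PySem.List.pyRange 0 10 1).map fun j => pvReplace (PySem.Int.toChars cur) i j

-- one filter/mark/append step of B:  if temp >= 1000 and prime[temp] and not visit[temp]: ...
def pvStepB (st : Array Int × List Int) (temp : Int) : Array Int × List Int :=
  if 1000 ≤ temp then
    match pvAGet? pvPrime temp with
    | none => st        -- Python raises IndexError here (outside Pre_)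
    | some pt =>
      if pt ≠ 0 then
        match pvAGet? st.1 temp with
        | none => st
        | some vt =>
          if vt = 0 then (pvASetD st.1 temp 1, st.2 ++ [temp]) else st
      else st
  else st

-- the recursive level function of B (fuel = totality guard only)
def pvLevelB (e : Int) : Nat → List Int → Array Int → Int → Option Int
  | 0, _, _, _ => none
  | _ + 1, [], _, _ => none
  | fuel + 1, frontier@(_ :: _), visit, depth =>
    if e ∈ frontier then some depth
    else
      let st := frontier.foldl (fun st cur => (pvNbrs cur).foldl pvStepB st)
        (visit, ([] : List Int))
      pvLevelB e fuel st.2 st.1 (depth + 1)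

def BFS_alt (s : Int) (e : Int) : Option Int :=
  match pvASet? (Array.replicate 10000 (0 : Int)) s 1 with
  | some visit => pvLevelB e 20002 [s] visit 0
  | none => none    -- Python raises IndexError on visit[s] = 1 (outside Pre_)

-- ===== PRECONDITION & SPEC =====
-- Pre_ excludes exactly the inputs on which the Python A raises IndexError: s outside
-- [-999, 9999] raises while expanding s's neighbours (or already at visit[s] = 1), except
-- that for s = e the function returns 0 before expanding, which is safe down to s = -10000.
def Pre_BFS (s : Int) (e : Int) : Prop :=
  (-999 ≤ s ∧ s ≤ 9999) ∨ (s = e ∧ -10000 ≤ s ∧ s ≤ 9999)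
instance (s : Int) (e : Int) : Decidable (Pre_BFS s e) := by unfold Pre_BFS; infer_instance

def pvWitness_BFS : Int × Int := (1033, 8179)

def Spec_BFS (s : Int) (e : Int) (out : Option Int) : Prop := out = BFS_alt s e
instance (s : Int) (e : Int) (out : Option Int) : Decidable (Spec_BFS s e out) := by
  unfold Spec_BFS; infer_instance

-- ===== CLAIM (what is proved, stated in full; the proofs are below) =====
def Claim_equal_BFS : Prop := ∀ (s : Int) (e : Int), Dom_BFS s e → Pre_BFS s e → Spec_BFS s e (BFS s e)

-- ===== LEMMAS AND PROOFS =====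

-- basic facts about Python's index normalisation
theorem pvIdx_lt {n : Nat} {i : Int} {k : Nat} (h : PySem.List.pyIdx? n i = some k) : k < n := by
  unfold PySem.List.pyIdx? at h
  split_ifs at h <;> simp_all <;> omega

theorem pvGet_some {xs : Array Int} {i v : Int} (h : pvAGet? xs i = some v) :
    ∃ k : Nat, PySem.List.pyIdx? xs.size i = some k ∧ k < xs.size ∧ xs[k]? = some v := by
  unfold pvAGet? at h
  cases hk : PySem.List.pyIdx? xs.size i with
  | none => rw [hk] at h; simp at h
  | some k => rw [hk] at h; exact ⟨k, rfl, pvIdx_lt hk, by simpa using h⟩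

theorem pvSetD_eq {xs : Array Int} {i : Int} {k : Nat} (v : Int)
    (hk : PySem.List.pyIdx? xs.size i = some k) :
    pvASetD xs i v = xs.setIfInBounds k v := by
  unfold pvASetD pvASet?
  rw [hk]; rfl

-- B's expansion measure: pending-output length + number of not-yet-visited cells; each
-- append marks a fresh cell, so a step never increases it
def pvMuB (st : Array Int × List Int) : Nat := st.2.length + st.1.toList.count 0

theorem pvStepB_mu (st : Array Int × List Int) (temp : Int) :
    pvMuB (pvStepB st temp) ≤ pvMuB st := by
  unfold pvStepB
  by_cases h1000 : 1000 ≤ temp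
  · rw [if_pos h1000]
    cases pvAGet? pvPrime temp with
    | none => exact le_rfl
    | some pt =>
      dsimp only
      by_cases hpt : pt ≠ 0
      · rw [if_pos hpt]
        cases hg : pvAGet? st.1 temp with
        | none => exact le_rfl
        | some vt =>
          dsimp only
          by_cases hv : vt = 0
          · subst hv
            rw [if_pos rfl]
            obtain ⟨k, hk, hlt, hget⟩ := pvGet_some hg
            rw [pvSetD_eq 1 hk]
            have hlt' : k < st.1.toList.length := by rw [Array.length_toList]; exact hlt
            have hgk : st.1.toList[k] = 0 := by
              have h' : st.1.toList[k]? = some 0 := Array.getElem?_toList.trans hget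
              rw [List.getElem?_eq_getElem hlt'] at h'
              exact Option.some.inj h'
            have hcnt := List.count_set (a := (1 : Int)) (b := (0 : Int)) (l := st.1.toList)
              (i := k) hlt'
            have hmem : (0 : Int) ∈ st.1.toList := hgk ▸ List.getElem_mem hlt'
            have hpos : 0 < st.1.toList.count 0 := List.count_pos_iff.mpr hmem
            simp only [pvMuB, List.length_append, List.length_cons, List.length_nil,
              Array.toList_setIfInBounds]
            split_ifs at hcnt with hb1 hb2
            all_goals first
              | (rw [hcnt]; omega)
              | exact absurd hb2 (by simp)
              | exact absurd (show (st.1.toList[k] == 0) = true by simp [hgk]) hb1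
          · rw [if_neg hv]
      · rw [if_neg hpt]
  · rw [if_neg h1000]

theorem pvFoldl_mu {α β : Type} (μ : α → Nat) (f : α → β → α)
    (h : ∀ a x, μ (f a x) ≤ μ a) (l : List β) (a : α) : μ (l.foldl f a) ≤ μ a := by
  induction l generalizing a with
  | nil => simp
  | cons x t ih => exact le_trans (ih (f a x)) (h a x)

-- prime lookup always yields 1 when the index is in range
theorem pvPrime_get {t : Int} {k : Nat} (hk : PySem.List.pyIdx? 10000 t = some k) :
    pvAGet? pvPrime t = some 1 := by
  have hk' : PySem.List.pyIdx? pvPrime.size t = some k := by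
    simpa [pvPrime] using hk
  unfold pvAGet?
  rw [hk']
  simp only [Option.bind_some]
  rw [← Array.getElem?_toList]
  have hl : pvPrime.toList = List.replicate 10000 1 := by simp [pvPrime]
  rw [hl, List.getElem?_replicate, if_pos (pvIdx_lt hk)]

theorem pvStepB_size (st : Array Int × List Int) (temp : Int) :
    (pvStepB st temp).1.size = st.1.size := by
  unfold pvStepB pvASetD pvASet?
  split_ifs with h1000
  · cases pvAGet? pvPrime temp with
    | none => rfl
    | some pt =>
      dsimp only
      split_ifs with hpt
      · cases hg : pvAGet? st.1 temp with
        | none => rfl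
        | some vt =>
          dsimp only
          split_ifs with hv
          · obtain ⟨k, hk, _, _⟩ := pvGet_some hg
            rw [hk]
            simp [Array.size_setIfInBounds]
          · rfl
      · rfl
  · rfl

theorem pvFoldB_size (l : List Int) (st : Array Int × List Int) :
    (l.foldl pvStepB st).1.size = st.1.size := by
  induction l generalizing st with
  | nil => rfl
  | cons x t ih => rw [List.foldl_cons, ih, pvStepB_size]

theorem pvExpandB_size (lvl : List Int) (st : Array Int × List Int) :
    (lvl.foldl (fun st cur => (pvNbrs cur).foldl pvStepB st) st).1.size = st.1.size := by
  induction lvl generalizing st with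
  | nil => rfl
  | cons x t ih => rw [List.foldl_cons, ih, pvFoldB_size]

-- one A-step on a queue 'Q ++ (mapped B-acc)' is one B-step, with the new pair appended
theorem pvStep_corr (cnt : Int) (v : Array Int) (Q : List (Int × Int)) (acc : List Int)
    (t : Int) (hv : v.size = 10000) :
    pvStepA cnt (v, Q ++ acc.map (fun n => (n, cnt + 1))) t =
      ((pvStepB (v, acc) t).1,
        Q ++ ((pvStepB (v, acc) t).2).map (fun n => (n, cnt + 1))) := by
  have hps : pvPrime.size = 10000 := by simp [pvPrime]
  unfold pvStepA pvStepB
  cases hidx : PySem.List.pyIdx? 10000 t with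
  | none =>
    have hvg : pvAGet? v t = none := by
      unfold pvAGet?
      rw [hv, hidx]
      rfl
    have hpg : pvAGet? pvPrime t = none := by
      unfold pvAGet?
      rw [hps, hidx]
      rfl
    simp [hvg, hpg]
  | some k =>
    have hpg : pvAGet? pvPrime t = some 1 := pvPrime_get hidx
    have hvk : PySem.List.pyIdx? v.size t = some k := by rw [hv]; exact hidx
    have hlt : k < v.size := pvIdx_lt hvk
    have hvg : pvAGet? v t = v[k]? := by
      unfold pvAGet?
      rw [hvk]
      rfl
    obtain ⟨vt, hvt⟩ : ∃ vt, v[k]? = some vt := ⟨v[k], Array.getElem?_eq_getElem hlt⟩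
    by_cases h1000 : 1000 ≤ t
    · by_cases hz : vt = 0
      · subst hz
        simp [hvg, hvt, hpg, h1000]
      · simp [hvg, hvt, hpg, h1000, hz]
    · by_cases hz : vt = 0
      · subst hz
        simp [hvg, hvt, hpg, h1000]
      · simp [hvg, hvt, h1000, hz]

-- fold version over a list of candidate numbers
theorem pvFold_corr (cnt : Int) (l : List Int) :
    ∀ (v : Array Int) (Q : List (Int × Int)) (acc : List Int), v.size = 10000 →
    l.foldl (pvStepA cnt) (v, Q ++ acc.map (fun n => (n, cnt + 1))) =
      (((l.foldl pvStepB (v, acc))).1,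
        Q ++ ((l.foldl pvStepB (v, acc)).2).map (fun n => (n, cnt + 1))) := by
  induction l with
  | nil => intro v Q acc _; rfl
  | cons t ts ih =>
    intro v Q acc hv
    rw [List.foldl_cons, List.foldl_cons, pvStep_corr cnt v Q acc t hv]
    have hsz : (pvStepB (v, acc) t).1.size = 10000 := by rw [pvStepB_size]; exact hv
    have := ih (pvStepB (v, acc) t).1 Q (pvStepB (v, acc) t).2 hsz
    simpa using this

-- A's nested i/j fold is the flat fold over the candidate list pvNbrs
theorem pvNest_eq {α : Type} (g : α → Int → α) (cur : Int) (st : α) :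
    (PySem.List.pyRange 0 4 1).foldl
      (fun st i => (PySem.List.pyRange 0 10 1).foldl
        (fun st j => g st (pvReplace (PySem.Int.toChars cur) i j)) st) st =
    (pvNbrs cur).foldl g st := by
  simp [pvNbrs, List.foldl_flatMap, List.foldl_map]

-- processing one whole level of A's queue costs exactly lvl.length fuel: return d if e
-- occurs in the level, otherwise continue with the accumulated next level (B's fold)
theorem pvLevel_corr (e d : Int) :
    ∀ (lvl acc : List Int) (v : Array Int) (f : Nat), v.size = 10000 →
    pvLoopA e (f + lvl.length) v
        (lvl.map (fun n => (n, d)) ++ acc.map (fun n => (n, d + 1))) =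
      (if e ∈ lvl then some d
       else
        pvLoopA e f
          (lvl.foldl (fun st cur => (pvNbrs cur).foldl pvStepB st) (v, acc)).1
          ((lvl.foldl (fun st cur => (pvNbrs cur).foldl pvStepB st) (v, acc)).2.map
            (fun n => (n, d + 1)))) := by
  intro lvl
  induction lvl with
  | nil =>
    intro acc v f _
    simp
  | cons cur rest ih =>
    intro acc v f hv
    show pvLoopA e ((f + rest.length) + 1) v _ = _
    by_cases hce : cur = e
    · subst hce
      rw [List.map_cons, List.cons_append, pvLoopA]
      simp
    · rw [List.map_cons, List.cons_append, pvLoopA]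
      simp only [if_neg hce]
      rw [pvNest_eq (pvStepA d) cur,
        pvFold_corr d (pvNbrs cur) v (rest.map (fun n => (n, d))) acc hv]
      have hsz : ((pvNbrs cur).foldl pvStepB (v, acc)).1.size = 10000 := by
        rw [pvFoldB_size]; exact hv
      rw [ih ((pvNbrs cur).foldl pvStepB (v, acc)).2
            ((pvNbrs cur).foldl pvStepB (v, acc)).1 f hsz]
      have hec : ¬ e = cur := fun h => hce h.symm
      have hmem : (e ∈ cur :: rest) = (e ∈ rest) := by
        simp [List.mem_cons, hec]
      rw [List.foldl_cons]
      by_cases hr : e ∈ rest <;> simp [hr, hmem]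

-- the two traversals agree whenever both fuels cover the measure
theorem pvMain (e : Int) :
    ∀ (g : Nat) (lvl : List Int) (v : Array Int) (d : Int) (f : Nat),
      v.size = 10000 →
      lvl.length + 2 * v.toList.count 0 ≤ g →
      lvl.length + 2 * v.toList.count 0 ≤ f →
      pvLoopA e f v (lvl.map (fun n => (n, d))) = pvLevelB e g lvl v d := by
  intro g
  induction g with
  | zero =>
    intro lvl v d f hv hg _
    have hnil : lvl = [] := List.eq_nil_of_length_eq_zero (by omega)
    subst hnil
    cases f with
    | zero => rfl
    | succ f => rfl
  | succ g ih =>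
    intro lvl v d f hv hg hf
    cases lvl with
    | nil =>
      cases f with
      | zero => rfl
      | succ f => rfl
    | cons x rest =>
      have hlen : (x :: rest).length ≤ f := le_trans (Nat.le_add_right _ _) hf
      obtain ⟨f', rfl⟩ : ∃ f', f = f' + (x :: rest).length :=
        ⟨f - (x :: rest).length, by omega⟩
      have h := pvLevel_corr e d (x :: rest) [] v f' hv
      simp only [List.map_nil, List.append_nil] at h
      rw [pvLevelB, h]
      by_cases hmem : e ∈ x :: rest
      · rw [if_pos hmem]
        simp [hmem]
      · rw [if_neg hmem]
        simp only [if_neg hmem]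
        have hmu := pvFoldl_mu pvMuB (fun st cur => (pvNbrs cur).foldl pvStepB st)
            (fun a y => pvFoldl_mu pvMuB _ (fun a' y' => pvStepB_mu a' _) _ a)
            (x :: rest) (v, ([] : List Int))
        simp only [pvMuB, List.length_nil, Nat.zero_add] at hmu
        simp only [List.length_cons] at hg hf
        exact ih _ _ (d + 1) f' (by rw [pvExpandB_size]; exact hv) (by omega) (by omega)

-- ===== VERDICT (by name: the statement is the Claim_ definition above) =====
theorem BFS_spec : Claim_equal_BFS := by
  intro s e _ hPre
  unfold Spec_BFS BFS BFS_alt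
  obtain ⟨k, hk⟩ : ∃ k : Nat, PySem.List.pyIdx? 10000 s = some k := by
    unfold PySem.List.pyIdx?
    rcases hPre with ⟨h1, h2⟩ | ⟨rfl, h1, h2⟩ <;> split_ifs <;>
      first
      | exact ⟨_, rfl⟩
      | (exfalso; push_cast at *; omega)
  have hk' : PySem.List.pyIdx? (Array.replicate 10000 (0 : Int)).size s = some k := by
    rw [Array.size_replicate]; exact hk
  have hset : pvASet? (Array.replicate 10000 (0 : Int)) s 1
      = some ((Array.replicate 10000 (0 : Int)).setIfInBounds k 1) := by
    unfold pvASet?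
    rw [hk']
    rfl
  rw [hset]
  have hcnt : ((Array.replicate 10000 (0 : Int)).setIfInBounds k 1).toList.count 0 ≤ 10000 := by
    calc ((Array.replicate 10000 (0 : Int)).setIfInBounds k 1).toList.count 0
        ≤ ((Array.replicate 10000 (0 : Int)).setIfInBounds k 1).toList.length :=
          List.count_le_length
      _ = 10000 := by
          rw [Array.length_toList, Array.size_setIfInBounds, Array.size_replicate]
  have := pvMain e 20002 [s] ((Array.replicate 10000 (0 : Int)).setIfInBounds k 1) 0 20002
    (by rw [Array.size_setIfInBounds, Array.size_replicate])
    (by simp only [List.length_cons, List.length_nil]; omega)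
    (by simp only [List.length_cons, List.length_nil]; omega)
  simpa using this
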